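-- pv_equiv track=rewrite | github.com/yedajeong/algorithm | programmers/연습문제/lv2/롤케이크자르기.py | solution
-- ===== SOURCE A (Python) =====
-- from collections import Counter
--
-- def solution(topping):
--     answer = 0
--     length = 0
--
--     back = Counter(topping)
--     front = {}
--
--     for top in topping:
--         if top in front:
--             front[top] += 1
--         else:
--             front[top] = 1
--         back[top] -= 1
--
--         if back[top] == 0:
--             del back[top]
--
--         if len(front) == len(back):
--             answer += 1
--
--     return answer
-- ===== SOURCE B (Python) =====
-- def solution(topping):
--     # suffix[i] = number of distinct toppings in topping[i:], suffix[n] = 0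
--     suffix = [0]
--     seen = set()
--     for t in reversed(topping):
--         seen.add(t)
--         suffix.append(len(seen))
--     suffix.reverse()
--     answer = 0
--     prefix = set()
--     for t, s in zip(topping, suffix[1:]):
--         prefix.add(t)
--         if len(prefix) == s:
--             answer += 1
--     return answer
-- ===== Notes on version B (the rewrite author's own statement) =====
-- stated objective: alternative
-- what changed: Replaces A's single pass that mutates two live counters (front dict grown, back Counter decremented with key deletion) by a two-phase decomposition: a right-to-left pass precomputes a suffix-distinct table with a seen-set, then a forward pass with a prefix set compares against the table.
import Mathlib
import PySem

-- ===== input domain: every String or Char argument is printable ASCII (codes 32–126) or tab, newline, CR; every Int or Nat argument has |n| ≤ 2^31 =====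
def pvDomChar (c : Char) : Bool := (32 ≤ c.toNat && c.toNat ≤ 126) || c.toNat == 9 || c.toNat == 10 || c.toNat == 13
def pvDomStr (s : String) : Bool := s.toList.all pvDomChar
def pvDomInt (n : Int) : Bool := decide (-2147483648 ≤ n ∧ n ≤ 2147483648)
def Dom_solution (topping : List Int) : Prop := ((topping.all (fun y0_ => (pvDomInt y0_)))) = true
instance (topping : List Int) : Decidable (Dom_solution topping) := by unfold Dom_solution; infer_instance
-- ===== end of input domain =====

-- B replaces A's single pass over two live counters by a two-phase decomposition
-- (precompute a suffix-distinct table right-to-left, then scan with a prefix set);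
-- same O(n) cost, proved to return the same count.

-- ===== PORT A =====
-- literal transliteration of A: one pass; front dict grown, back Counter decremented,
-- zero entries deleted, answer incremented when the two dicts have equal length
def solution (topping : List Int) : Int :=
  (topping.foldl
    (fun (st : Int × PySem.Dict Int Int × PySem.Dict Int Int) top =>
      let answer := st.1
      let front := st.2.1
      let back := st.2.2
      let front := if front.contains top then front.modify top 0 (· + 1)
                   else front.insert top 1
      let back := back.modify top 0 (· - 1)          -- back[top] -= 1 (Counter default 0)
      let back := if back.getD top 0 = 0 then back.erase top else back
      let answer := if front.size = back.size then answer + 1 else answer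
      (answer, front, back))
    (0, PySem.Dict.empty, PySem.Dict.counter topping)).1

-- ===== PORT B =====
-- literal transliteration of Source B: build suffix = [distinct(topping[i:]) for i] by a
-- reversed pass with a seen-set, then zip topping with suffix[1:] and scan with a prefix set
def solution_alt (topping : List Int) : Int :=
  let p := topping.reverse.foldl
    (fun (p : List Int × PySem.Set Int) t =>
      let seen := PySem.Set.add p.2 t
      (p.1 ++ [PySem.Set.len seen], seen))
    ([(0 : Int)], PySem.Set.empty)
  let suffix := p.1.reverse
  ((topping.zip (PySem.List.slice suffix (some 1) none)).foldl
    (fun (st : Int × PySem.Set Int) ts =>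
      let pref := PySem.Set.add st.2 ts.1
      let answer := if PySem.Set.len pref = ts.2 then st.1 + 1 else st.1
      (answer, pref))
    (0, PySem.Set.empty)).1

-- ===== PRECONDITION & SPEC =====
def Spec_solution (topping : List Int) (out : Int) : Prop := out = solution_alt topping
instance (topping : List Int) (out : Int) : Decidable (Spec_solution topping out) := by unfold Spec_solution; infer_instance

-- ===== CLAIM (what is proved, stated in full; the proofs are below) =====
def Claim_equal_solution : Prop := ∀ (topping : List Int), Dom_solution topping → Spec_solution topping (solution topping)

-- ===== LEMMAS AND PROOFS =====

-- proof-side names for the three loop bodies (definitionally equal to the lambdas in the ports)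
def stepA (st : Int × PySem.Dict Int Int × PySem.Dict Int Int) (top : Int) :
    Int × PySem.Dict Int Int × PySem.Dict Int Int :=
  let answer := st.1
  let front := st.2.1
  let back := st.2.2
  let front := if front.contains top then front.modify top 0 (· + 1)
               else front.insert top 1
  let back := back.modify top 0 (· - 1)
  let back := if back.getD top 0 = 0 then back.erase top else back
  let answer := if front.size = back.size then answer + 1 else answer
  (answer, front, back)

def stepS (p : List Int × PySem.Set Int) (t : Int) : List Int × PySem.Set Int :=
  let seen := PySem.Set.add p.2 t
  (p.1 ++ [PySem.Set.len seen], seen)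

def stepB (st : Int × PySem.Set Int) (ts : Int × Int) : Int × PySem.Set Int :=
  let pref := PySem.Set.add st.2 ts.1
  let answer := if PySem.Set.len pref = ts.2 then st.1 + 1 else st.1
  (answer, pref)

-- number of distinct elements of a list
def dLen (l : List Int) : Nat := (PySem.Set.ofList l).length

-- reference count: scanning `rest` with current prefix-set `S`, count the positions
-- whose prefix-distinct equals the distinct count of the remaining suffix
def goodCnt (S : PySem.Set Int) : List Int → Int
  | [] => 0
  | t :: r => (if (PySem.Set.add S t).length = dLen r then (1:Int) else 0)
              + goodCnt (PySem.Set.add S t) r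

-- two nodup lists with the same members have the same length
theorem length_eq_of_nodup_same_mem {l₁ l₂ : List Int} (h₁ : l₁.Nodup) (h₂ : l₂.Nodup)
    (h : ∀ a, a ∈ l₁ ↔ a ∈ l₂) : l₁.length = l₂.length :=
  ((List.perm_ext_iff_of_nodup h₁ h₂).2 h).length_eq

theorem dLen_eq_of_nodup_same_mem {l : List Int} {r : List Int} (h : l.Nodup)
    (hm : ∀ a, a ∈ l ↔ a ∈ r) : l.length = dLen r :=
  length_eq_of_nodup_same_mem h (PySem.Set.nodup_ofList r)
    (fun a => (hm a).trans (PySem.Set.mem_ofList r a).symm)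

-- ---- Dict.erase facts (erase filters the items list) ----
theorem get?_erase_self (d : PySem.Dict Int Int) (k : Int) :
    (d.erase k).get? k = none := by
  simp [PySem.Dict.erase, PySem.Dict.get?]

theorem find?_filter_ne_of_ne (items : List (Int × Int)) {v k : Int} (h : v ≠ k) :
    (items.filter (fun p => !(p.1 == k))).find? (fun p => p.1 == v)
      = items.find? (fun p => p.1 == v) := by
  induction items with
  | nil => rfl
  | cons p rest ih =>
    rw [List.filter_cons]
    by_cases hk : p.1 = k
    · have hv : ¬ (p.1 = v) := by rw [hk]; exact fun hh => h hh.symm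
      rw [if_neg (by simp [hk]), List.find?_cons_of_neg (by simp [hv])]
      exact ih
    · by_cases hv : p.1 = v
      · rw [if_pos (by simp [hk]), List.find?_cons_of_pos (by simp [hv]),
            List.find?_cons_of_pos (by simp [hv])]
      · rw [if_pos (by simp [hk]), List.find?_cons_of_neg (by simp [hv]),
            List.find?_cons_of_neg (by simp [hv])]
        exact ih

theorem get?_erase_of_ne (d : PySem.Dict Int Int) {v k : Int} (h : v ≠ k) :
    (d.erase k).get? v = d.get? v := by
  simp [PySem.Dict.erase, PySem.Dict.get?, find?_filter_ne_of_ne _ h]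

theorem keys_erase (d : PySem.Dict Int Int) (k : Int) :
    (d.erase k).keys = d.keys.filter (fun x => !(x == k)) := by
  simp [PySem.Dict.erase, PySem.Dict.keys, List.filter_map]
  rfl

theorem size_eq_keys_length (d : PySem.Dict Int Int) : d.size = d.keys.length := by
  simp [PySem.Dict.size, PySem.Dict.keys]

-- ---- A's loop ----
theorem loopA (rest : List Int) : ∀ (front back : PySem.Dict Int Int) (ans : Int),
    front.keys.Nodup → back.keys.Nodup →
    (∀ v, v ∈ back.keys ↔ v ∈ rest) →
    (∀ v, back.getD v 0 = (rest.count v : Int)) →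
    (rest.foldl stepA (ans, front, back)).1 = ans + goodCnt front.keys rest := by
  induction rest with
  | nil => intro front back ans _ _ _ _; simp [goodCnt]
  | cons t r ih =>
    intro front back ans hf hbn hbm hbc
    -- the updated front
    set front' := (if front.contains t then front.modify t 0 (· + 1)
                   else front.insert t 1) with hfront'
    have hfk : front'.keys = PySem.Set.add front.keys t := by
      rw [hfront']
      by_cases hc : front.contains t = true
      · rw [if_pos hc, PySem.Dict.keys_modify, PySem.Dict.keys_insert_of_contains _ _ hc,
            PySem.Set.add_of_mem ((PySem.Dict.contains_iff_mem_keys front t).1 hc)]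
      · have hc' : front.contains t = false := by
          cases h : front.contains t
          · rfl
          · exact absurd h hc
        rw [if_neg hc, PySem.Dict.keys_insert_of_not_contains _ _ hc',
            PySem.Set.add_of_not_mem (fun hm =>
              hc ((PySem.Dict.contains_iff_mem_keys front t).2 hm))]
    have hfk' : front'.keys.Nodup := by rw [hfk]; exact PySem.Set.nodup_add _ _ hf
    -- back after the decrement
    set back1 := back.modify t 0 (· - 1) with hback1
    have hb1t : back1.getD t 0 = (r.count t : Int) := by
      rw [hback1, PySem.Dict.getD_modify_self, hbc t, List.count_cons_self]
      push_cast; ring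
    have hb1v : ∀ v, back1.getD v 0 = if v = t then (r.count t : Int) else back.getD v 0 := by
      intro v
      rw [hback1, PySem.Dict.getD_modify]
      by_cases hv : v = t
      · rw [if_pos hv, if_pos hv, hbc t, List.count_cons_self]; push_cast; ring
      · rw [if_neg hv, if_neg hv]
    have hb1keys : back1.keys = back.keys := by
      have hc : back.contains t = true :=
        (PySem.Dict.contains_iff_mem_keys back t).2 ((hbm t).2 (List.mem_cons_self))
      rw [hback1, PySem.Dict.keys_modify, PySem.Dict.keys_insert_of_contains _ _ hc]
    -- back after the possible deletion
    set back2 := (if back1.getD t 0 = 0 then back1.erase t else back1) with hback2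
    have hb2n : back2.keys.Nodup := by
      rw [hback2]
      by_cases h0 : back1.getD t 0 = 0
      · rw [if_pos h0, keys_erase, hb1keys]; exact hbn.filter _
      · rw [if_neg h0, hb1keys]; exact hbn
    have hb2m : ∀ v, v ∈ back2.keys ↔ v ∈ r := by
      intro v
      rw [hback2]
      by_cases h0 : back1.getD t 0 = 0
      · have htr : t ∉ r := by
          intro hm
          rw [hb1t] at h0
          have := List.count_pos_iff.2 hm
          omega
        rw [if_pos h0, keys_erase, hb1keys]
        constructor
        · intro hmem
          have hm1 : v ∈ back.keys := (List.mem_filter.1 hmem).1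
          have hne : v ≠ t := by
            have h2 := (List.mem_filter.1 hmem).2
            simpa using h2
          rcases List.mem_cons.1 ((hbm v).1 hm1) with h1 | h1
          · exact absurd h1 hne
          · exact h1
        · intro hmem
          refine List.mem_filter.2 ⟨(hbm v).2 (List.mem_cons_of_mem _ hmem), ?_⟩
          have hne : v ≠ t := fun hv => htr (hv ▸ hmem)
          simpa using hne
      · have htr : t ∈ r := by
          rw [hb1t] at h0
          by_contra hm
          rw [List.count_eq_zero_of_not_mem hm] at h0
          exact h0 rfl
        rw [if_neg h0, hb1keys, hbm v, List.mem_cons]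
        constructor
        · rintro (h | h)
          · exact h ▸ htr
          · exact h
        · exact Or.inr
    have hb2c : ∀ v, back2.getD v 0 = (r.count v : Int) := by
      intro v
      rw [hback2]
      by_cases h0 : back1.getD t 0 = 0
      · rw [if_pos h0]
        by_cases hv : v = t
        · subst hv
          simp only [PySem.Dict.getD, get?_erase_self, Option.getD_none]
          rw [hb1t] at h0
          exact h0.symm
        · rw [PySem.Dict.getD, get?_erase_of_ne _ hv, ← PySem.Dict.getD, hb1v v, if_neg hv,
              hbc v, List.count_cons_of_ne (Ne.symm hv)]
      · rw [if_neg h0, hb1v v]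
        by_cases hv : v = t
        · rw [if_pos hv, hv]
        · rw [if_neg hv, hbc v, List.count_cons_of_ne (Ne.symm hv)]
    -- sizes
    have hfsize : front'.size = (PySem.Set.add front.keys t).length := by
      rw [size_eq_keys_length, hfk]
    have hbsize : back2.size = dLen r := by
      rw [size_eq_keys_length]
      exact dLen_eq_of_nodup_same_mem hb2n hb2m
    -- one unfolding of the fold
    have happ : stepA (ans, front, back) t
        = (if front'.size = back2.size then ans + 1 else ans, front', back2) := by
      rw [hfront', hback2, hback1]
      rfl
    rw [List.foldl_cons, happ, ih _ _ _ hfk' hb2n hb2m hb2c]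
    simp only [goodCnt, hfk, hfsize, hbsize]
    by_cases hcond : (PySem.Set.add front.keys t).length = dLen r
    · rw [if_pos hcond, if_pos hcond]; ring
    · rw [if_neg hcond, if_neg hcond]; ring

-- ---- B's suffix table ----
-- the Int entries produced by the reversed pass, starting from a given seen-set
def lens (seen : PySem.Set Int) : List Int → List Int
  | [] => []
  | t :: r => PySem.Set.len (PySem.Set.add seen t) :: lens (PySem.Set.add seen t) r

-- the second components B zips with: for t :: r the entry is distinct(r)
def sufAux : List Int → List Int
  | [] => []
  | _ :: r => (dLen r : Int) :: sufAux r

theorem set_len_eq (s : PySem.Set Int) : PySem.Set.len s = (s.length : Int) := by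
  simp [PySem.Set.len]

theorem revFold (ys : List Int) : ∀ (acc : List Int) (seen : PySem.Set Int),
    (ys.foldl stepS (acc, seen)) = (acc ++ lens seen ys, PySem.Set.update seen ys) := by
  induction ys with
  | nil => intro acc seen; simp [lens, PySem.Set.update]
  | cons t r ih =>
    intro acc seen
    have h1 : stepS (acc, seen) t
        = (acc ++ [PySem.Set.len (PySem.Set.add seen t)], PySem.Set.add seen t) := rfl
    rw [List.foldl_cons, h1, ih]
    simp [lens, PySem.Set.update, List.append_assoc]

theorem lens_append (a b : List Int) : ∀ (seen : PySem.Set Int),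
    lens seen (a ++ b) = lens seen a ++ lens (PySem.Set.update seen a) b := by
  induction a with
  | nil => intro seen; simp [lens, PySem.Set.update]
  | cons t r ih =>
    intro seen
    simp only [List.cons_append, lens, ih]
    simp [PySem.Set.update]

theorem update_empty_eq_ofList (l : List Int) :
    PySem.Set.update PySem.Set.empty l = PySem.Set.ofList l := by
  rw [PySem.Set.ofList_eq_foldl]; rfl

theorem suffix_main (xs : List Int) :
    (lens PySem.Set.empty xs.reverse).reverse ++ [(0:Int)]
      = (dLen xs : Int) :: sufAux xs := by
  induction xs with
  | nil => simp [lens, dLen, sufAux, PySem.Set.ofList]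
  | cons x r ih =>
    have hrev : (x :: r).reverse = r.reverse ++ [x] := by simp
    rw [hrev, lens_append, update_empty_eq_ofList]
    have hlast : lens (PySem.Set.ofList r.reverse) [x]
        = [PySem.Set.len (PySem.Set.add (PySem.Set.ofList r.reverse) x)] := rfl
    have hlen : (PySem.Set.add (PySem.Set.ofList r.reverse) x).length = dLen (x :: r) := by
      apply dLen_eq_of_nodup_same_mem
        (PySem.Set.nodup_add _ _ (PySem.Set.nodup_ofList r.reverse))
      intro a
      rw [PySem.Set.mem_add]
      simp [PySem.Set.mem_ofList, List.mem_cons, or_comm]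
    rw [hlast, set_len_eq, hlen]
    simp only [List.reverse_append, List.reverse_cons, List.reverse_nil, List.nil_append,
      List.cons_append, sufAux]
    rw [ih]

-- ---- B's scan loop ----
theorem loopB (rest : List Int) : ∀ (S : PySem.Set Int) (ans : Int),
    ((rest.zip (sufAux rest)).foldl stepB (ans, S)).1 = ans + goodCnt S rest := by
  induction rest with
  | nil => intro S ans; simp [sufAux, goodCnt]
  | cons t r ih =>
    intro S ans
    simp only [sufAux, List.zip_cons_cons, List.foldl_cons]
    have h1 : stepB (ans, S) (t, (dLen r : Int))
        = (if PySem.Set.len (PySem.Set.add S t) = (dLen r : Int) then ans + 1 else ans,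
           PySem.Set.add S t) := rfl
    rw [h1, ih]
    simp only [goodCnt, set_len_eq]
    by_cases hcond : (PySem.Set.add S t).length = dLen r
    · rw [if_pos (by exact_mod_cast hcond), if_pos hcond]; ring
    · rw [if_neg (by exact_mod_cast hcond), if_neg hcond]; ring

-- B computed as the reference count
theorem solution_alt_eq (topping : List Int) :
    solution_alt topping = goodCnt PySem.Set.empty topping := by
  have e0 : solution_alt topping
      = ((topping.zip (PySem.List.slice
            ((topping.reverse.foldl stepS ([(0:Int)], PySem.Set.empty)).1.reverse)
            (some 1) none)).foldl stepB (0, PySem.Set.empty)).1 := rfl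
  rw [e0, revFold]
  have hl : ([(0:Int)] ++ lens PySem.Set.empty topping.reverse).reverse
      = (dLen topping : Int) :: sufAux topping := by
    rw [show ([(0:Int)] ++ lens PySem.Set.empty topping.reverse).reverse
        = (lens PySem.Set.empty topping.reverse).reverse ++ [(0:Int)] by simp]
    exact suffix_main topping
  simp only [hl, PySem.List.slice_from_one, List.tail_cons]
  rw [loopB]
  ring

-- ===== VERDICT (by name: the statement is the Claim_ definition above) =====
theorem solution_spec : Claim_equal_solution := by
  intro topping _
  unfold Spec_solution
  rw [solution_alt_eq]
  have e0 : solution topping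
      = (topping.foldl stepA (0, PySem.Dict.empty, PySem.Dict.counter topping)).1 := rfl
  rw [e0, loopA topping PySem.Dict.empty (PySem.Dict.counter topping) 0
    (by rw [PySem.Dict.keys_empty]; exact List.nodup_nil)
    (PySem.Dict.nodup_keys_counter topping)
    (fun v => by rw [PySem.Dict.keys_counter]; exact PySem.Set.mem_ofList topping v)
    (fun v => by rw [PySem.Dict.getD_counter])]
  rw [PySem.Dict.keys_empty]
  simp [PySem.Set.empty]
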